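-- pv_equiv track=rewrite | github.com/marineHero1/PythonApplication1 | PythonApplication1/leetcodeLCP18.py | breakfastNumber
-- ===== SOURCE A (Python) =====
-- def breakfastNumber(staple, drinks, x):
--     #双指针
--     staple=sorted(staple)
--     drinks=sorted(drinks)
--     leng1=len(staple)
--     j=len(drinks)-1
--     i=0
--     res=0
--     while(i<leng1 and j>=0):
--         if staple[i]+drinks[j]<=x:
--             res+=j+1
--             i+=1
--         else:
--             j-=1
--     return res % 1000000007
-- ===== SOURCE B (Python) =====
-- import bisect
--
-- def breakfastNumber(staple, drinks, x):
--     # sort only drinks; one independent binary search per staple element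
--     drinks = sorted(drinks)
--     res = 0
--     for s in staple:
--         res += bisect.bisect_right(drinks, x - s)
--     return res % 1000000007
-- ===== Notes on version B (the rewrite author's own statement) =====
-- stated objective: idiomatic
-- what changed: Replaces the two-pointer walk over both sorted arrays by sorting only drinks and doing an independent bisect_right per staple element, keeping no cross-iteration pointer state.
import Mathlib
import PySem

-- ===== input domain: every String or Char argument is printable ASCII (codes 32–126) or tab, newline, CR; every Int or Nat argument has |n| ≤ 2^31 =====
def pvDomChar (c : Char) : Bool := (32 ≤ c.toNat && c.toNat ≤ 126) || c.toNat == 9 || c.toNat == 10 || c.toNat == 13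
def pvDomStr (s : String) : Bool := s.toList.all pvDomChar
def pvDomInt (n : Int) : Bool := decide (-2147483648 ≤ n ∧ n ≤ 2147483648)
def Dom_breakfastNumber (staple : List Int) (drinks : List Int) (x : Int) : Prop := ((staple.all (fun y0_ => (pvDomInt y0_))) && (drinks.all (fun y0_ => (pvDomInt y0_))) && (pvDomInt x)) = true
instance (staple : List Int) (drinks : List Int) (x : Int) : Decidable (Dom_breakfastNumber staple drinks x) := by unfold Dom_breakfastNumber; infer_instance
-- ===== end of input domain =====

-- B replaces A's two-pointer walk over both sorted arrays by an independent
-- bisect_right per staple element against sorted drinks (idiomatic; no pointer state).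

-- ===== PORT A =====
-- the while loop of A; the indexed accesses are in range whenever the loop is
-- entered from breakfastNumber (0 ≤ i < leng1 and 0 ≤ j < len dd), so pyGet?.getD 0 is exact there
def pvLoopA (ss dd : List Int) (x : Int) (i j res : Int) : Int :=
  if h : i < (ss.length : Int) ∧ 0 ≤ j then
    if (PySem.List.pyGet? ss i).getD 0 + (PySem.List.pyGet? dd j).getD 0 ≤ x then
      pvLoopA ss dd x (i + 1) j (res + (j + 1))
    else
      pvLoopA ss dd x i (j - 1) res
  else res
termination_by (((ss.length : Int) - i) + (j + 1)).toNat
decreasing_by all_goals omega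

def breakfastNumber (staple : List Int) (drinks : List Int) (x : Int) : Int :=
  let ss := PySem.List.sorted staple (fun s => s) false
  let dd := PySem.List.sorted drinks (fun d => d) false
  PySem.Int.mod (pvLoopA ss dd x 0 ((dd.length : Int) - 1) 0) 1000000007

-- ===== PORT B =====
def breakfastNumber_alt (staple : List Int) (drinks : List Int) (x : Int) : Int :=
  let dd := PySem.List.sorted drinks (fun d => d) false
  let res := staple.foldl (fun res s => res + (PySem.List.bisectRight dd (x - s) : Int)) 0
  PySem.Int.mod res 1000000007

-- ===== PRECONDITION & SPEC =====
def Spec_breakfastNumber (staple : List Int) (drinks : List Int) (x : Int) (out : Int) : Prop := out = breakfastNumber_alt staple drinks x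
instance (staple : List Int) (drinks : List Int) (x : Int) (out : Int) : Decidable (Spec_breakfastNumber staple drinks x out) := by unfold Spec_breakfastNumber; infer_instance

-- ===== CLAIM (what is proved, stated in full; the proofs are below) =====
def Claim_equal_breakfastNumber : Prop := ∀ (staple : List Int) (drinks : List Int) (x : Int), Dom_breakfastNumber staple drinks x → Spec_breakfastNumber staple drinks x (breakfastNumber staple drinks x)

-- ===== LEMMAS AND PROOFS =====

-- A's loop sums, over the not-yet-consumed suffix of ss, the bisectRight count of dd,
-- provided every count in that suffix is bounded by j+1 and j+1 ≤ |dd|.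
theorem pvLoopA_eq (ss dd : List Int) (x : Int)
    (hss : List.Pairwise (fun a b => a ≤ b) ss)
    (hdd : List.Pairwise (fun a b => a ≤ b) dd) :
    ∀ (n : Nat) (i j res : Int), ((((ss.length : Int) - i) + (j + 1)).toNat = n) →
      0 ≤ i → j + 1 ≤ (dd.length : Int) →
      (∀ s ∈ ss.drop i.toNat, ((PySem.List.bisectRight dd (x - s) : Nat) : Int) ≤ j + 1) →
      pvLoopA ss dd x i j res
        = res + ((ss.drop i.toNat).map (fun s => ((PySem.List.bisectRight dd (x - s) : Nat) : Int))).sum := by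
  intro n
  induction n using Nat.strong_induction_on with
  | _ n ih =>
    intro i j res hn hi hjlen hinv
    rw [pvLoopA]
    by_cases hg : i < (ss.length : Int) ∧ 0 ≤ j
    · rw [dif_pos hg]
      obtain ⟨hilt, hj0⟩ := hg
      have hiN : i.toNat < ss.length := by omega
      have hjN : j.toNat < dd.length := by omega
      have hdrop : ss.drop i.toNat = ss[i.toNat] :: ss.drop (i.toNat + 1) :=
        List.drop_eq_getElem_cons hiN
      have hjlt : j < (dd.length : Int) := by omega
      have hgi : (PySem.List.pyGet? ss i).getD 0 = ss[i.toNat] := by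
        simp [PySem.List.pyGet?, PySem.List.pyIdx?, hi, hilt, hiN]
      have hgj : (PySem.List.pyGet? dd j).getD 0 = dd[j.toNat] := by
        simp [PySem.List.pyGet?, PySem.List.pyIdx?, hj0, hjlt, hjN]
      have hspec := PySem.List.bisectRight_spec dd (x - ss[i.toNat]) hdd
      by_cases hc : ss[i.toNat] + dd[j.toNat] ≤ x
      · rw [if_pos (by rw [hgi, hgj]; exact hc)]
        -- the count at ss[i.toNat] is exactly j+1
        have hub : ((PySem.List.bisectRight dd (x - ss[i.toNat]) : Nat) : Int) ≤ j + 1 := by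
          apply hinv; rw [hdrop]; exact List.mem_cons_self
        have hlb : j.toNat < PySem.List.bisectRight dd (x - ss[i.toNat]) := by
          by_contra hle
          have := hspec.2.2 j.toNat hjN (by omega)
          omega
        have hcnt : ((PySem.List.bisectRight dd (x - ss[i.toNat]) : Nat) : Int) = j + 1 := by omega
        have hsucc : (i+1).toNat = i.toNat + 1 := by omega
        have hinv' : ∀ s ∈ ss.drop (i+1).toNat,
            ((PySem.List.bisectRight dd (x - s) : Nat) : Int) ≤ j + 1 := by
          intro s hs
          apply hinv
          rw [hsucc] at hs
          rw [hdrop]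
          exact List.mem_cons_of_mem _ hs
        rw [ih ((((ss.length : Int) - (i+1)) + (j + 1)).toNat) (by omega) (i+1) j
            (res + (j + 1)) rfl (by omega) hjlen hinv']
        rw [hsucc, hdrop, List.map_cons, List.sum_cons, hcnt]
        ring
      · rw [if_neg (by rw [hgi, hgj]; exact hc)]
        have hnewinv : ∀ s ∈ ss.drop i.toNat,
            ((PySem.List.bisectRight dd (x - s) : Nat) : Int) ≤ (j - 1) + 1 := by
          intro s hs
          have hle : ss[i.toNat] ≤ s := by
            rw [hdrop] at hs
            rcases List.mem_cons.mp hs with h1 | h1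
            · exact le_of_eq h1.symm
            · have hp := hss.drop (i := i.toNat)
              rw [hdrop] at hp
              exact (List.pairwise_cons.mp hp).1 s h1
          -- x - s ≤ x - ss[i.toNat] < dd[j.toNat], so the count is ≤ j.toNat
          have hlt : x - s < dd[j.toNat] := by omega
          by_contra hgt
          have hjlt : j.toNat < PySem.List.bisectRight dd (x - s) := by omega
          have := (PySem.List.bisectRight_spec dd (x - s) hdd).2.1 j.toNat hjN hjlt
          omega
        rw [ih ((((ss.length : Int) - i) + ((j-1) + 1)).toNat) (by omega) i (j-1) res
            rfl hi (by omega) hnewinv]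
    · rw [dif_neg hg]
      push Not at hg
      by_cases hil : i < (ss.length : Int)
      · -- then j < 0 : every count in the suffix is 0
        have hj : j < 0 := hg hil
        have hzero : ∀ y ∈ (ss.drop i.toNat).map
            (fun s => ((PySem.List.bisectRight dd (x - s) : Nat) : Int)), y = 0 := by
          intro y hy
          obtain ⟨s, hs, rfl⟩ := List.mem_map.mp hy
          have := hinv s hs
          omega
        rw [List.sum_eq_zero hzero]; ring
      · have : ss.drop i.toNat = [] := by
          apply List.drop_eq_nil_of_le; omega
        simp [this]

-- foldl of B is the sum of the mapped counts
theorem foldl_counts (dd : List Int) (x : Int) :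
    ∀ (l : List Int) (a : Int),
      l.foldl (fun res s => res + (PySem.List.bisectRight dd (x - s) : Int)) a
        = a + (l.map (fun s => ((PySem.List.bisectRight dd (x - s) : Nat) : Int))).sum := by
  intro l
  induction l with
  | nil => simp
  | cons h t iht => intro a; simp [List.foldl_cons, iht]; ring

-- ===== VERDICT (by name: the statement is the Claim_ definition above) =====
theorem breakfastNumber_spec : Claim_equal_breakfastNumber := by
  intro staple drinks x _
  unfold Spec_breakfastNumber breakfastNumber breakfastNumber_alt
  set ss := PySem.List.sorted staple (fun s => s) false with hssdef
  set dd := PySem.List.sorted drinks (fun d => d) false with hdddef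
  have hss : List.Pairwise (fun a b => a ≤ b) ss := PySem.List.sorted_pairwise staple (fun s => s)
  have hdd : List.Pairwise (fun a b => a ≤ b) dd := PySem.List.sorted_pairwise drinks (fun d => d)
  have hinit : ∀ s ∈ ss.drop (0 : Int).toNat,
      ((PySem.List.bisectRight dd (x - s) : Nat) : Int) ≤ ((dd.length : Int) - 1) + 1 := by
    intro s _
    have := (PySem.List.bisectRight_spec dd (x - s) hdd).1
    omega
  have hA := pvLoopA_eq ss dd x hss hdd
      ((((ss.length : Int) - 0) + (((dd.length : Int) - 1) + 1)).toNat)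
      0 ((dd.length : Int) - 1) 0 rfl (by omega) (by omega) hinit
  have hB := foldl_counts dd x staple 0
  show PySem.Int.mod (pvLoopA ss dd x 0 ((dd.length : Int) - 1) 0) 1000000007
      = PySem.Int.mod (List.foldl (fun res s => res + ((PySem.List.bisectRight dd (x - s) : Nat) : Int)) 0 staple) 1000000007
  simp only [Int.toNat_zero, List.drop_zero] at hA
  rw [hA, hB]
  have hperm : (ss.map (fun s => ((PySem.List.bisectRight dd (x - s) : Nat) : Int))).Perm
      (staple.map (fun s => ((PySem.List.bisectRight dd (x - s) : Nat) : Int))) :=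
    (PySem.List.sorted_perm staple (fun s => s) false).map _
  rw [hperm.sum_eq]
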